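-- pv_equiv track=rewrite | github.com/InbalPreuss/InbalPreuss-dna_storage_simulation_2d_rs_EC_erasure_old | fastq_handling.py | get_seq_id_offset
-- ===== SOURCE A (Python) =====
-- def get_seq_id_offset(a_seq_id):
--     total_seq_index = a_seq_id
--     multiply_offset = 9
--     number_of_id_digits = 1
--     offset = 0
--
--     while (total_seq_index - multiply_offset) > 0:
--         offset += (multiply_offset * number_of_id_digits)
--         total_seq_index -= multiply_offset
--         multiply_offset *= 10
--         number_of_id_digits += 1
--
--     offset += ((total_seq_index - 1) * number_of_id_digits)
--     return offset
-- ===== SOURCE B (Python) =====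
-- def _num_digits(n):
--     d = 0
--     while n > 0:
--         n //= 10
--         d += 1
--     return d
--
--
-- def get_seq_id_offset(a_seq_id):
--     if a_seq_id <= 9:
--         return a_seq_id - 1
--     d = _num_digits(a_seq_id - 1)
--     return a_seq_id * d - (10 ** d - 1) // 9
-- ===== Notes on version B (the rewrite author's own statement) =====
-- stated objective: simpler
-- what changed: Replaces A's band-accumulating while loop (repeatedly subtracting the current band width while summing band*digits) with a digit count of the previous id followed by the closed-form repunit formula a*d - (10**d - 1)//9, with a direct single-digit base case.
import Mathlib
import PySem

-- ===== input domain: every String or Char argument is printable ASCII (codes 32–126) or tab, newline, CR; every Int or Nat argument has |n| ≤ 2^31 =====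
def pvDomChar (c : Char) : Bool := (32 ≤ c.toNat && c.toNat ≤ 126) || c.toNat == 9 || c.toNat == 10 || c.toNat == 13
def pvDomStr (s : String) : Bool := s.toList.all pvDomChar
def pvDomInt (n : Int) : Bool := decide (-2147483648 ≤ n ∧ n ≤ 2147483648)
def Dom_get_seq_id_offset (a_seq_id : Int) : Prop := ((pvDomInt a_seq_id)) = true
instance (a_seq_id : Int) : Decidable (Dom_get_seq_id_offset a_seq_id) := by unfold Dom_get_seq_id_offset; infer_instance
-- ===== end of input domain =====

-- B replaces A's band-accumulating while loop by a digit count of a_seq_id - 1 plus the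
-- closed-form offset a*d - (10^d - 1)//9 (objective: simpler).

-- ===== PORT A =====
-- A's while loop; the extra `0 < mult` conjunct only makes the recursion total
-- (from A's entry mult = 9 > 0 it always holds, so the guard never changes the result).
def pvLoopA (total mult digits offset : Int) : Int :=
  if h : 0 < mult ∧ 0 < total - mult then
    pvLoopA (total - mult) (mult * 10) (digits + 1) (offset + mult * digits)
  else
    offset + (total - 1) * digits
termination_by total.toNat
decreasing_by omega

def get_seq_id_offset (a_seq_id : Int) : Int :=
  pvLoopA a_seq_id 9 1 0

-- ===== PORT B =====
-- Source B's _num_digits loop (n //= 10 is PySem.Int.floordiv, exact)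
def pvNumDigits (n : Int) : Int :=
  if h : 0 < n then pvNumDigits (PySem.Int.floordiv n 10) + 1 else 0
termination_by n.toNat
decreasing_by
  have := PySem.Int.floordiv_eq_ediv_of_pos (a := n) (b := 10) (by norm_num)
  omega

-- Python's `(10**d - 1) // 9` has a positive divisor and nonnegative dividend, so `/` is exact here.
def get_seq_id_offset_alt (a_seq_id : Int) : Int :=
  if a_seq_id ≤ 9 then a_seq_id - 1
  else a_seq_id * pvNumDigits (a_seq_id - 1)
         - ((10 : Int) ^ (pvNumDigits (a_seq_id - 1)).toNat - 1) / 9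

-- ===== PRECONDITION & SPEC =====
def Spec_get_seq_id_offset (a_seq_id : Int) (out : Int) : Prop := out = get_seq_id_offset_alt a_seq_id
instance (a_seq_id : Int) (out : Int) : Decidable (Spec_get_seq_id_offset a_seq_id out) := by unfold Spec_get_seq_id_offset; infer_instance

-- ===== CLAIM (what is proved, stated in full; the proofs are below) =====
def Claim_equal_get_seq_id_offset : Prop := ∀ (a_seq_id : Int), Dom_get_seq_id_offset a_seq_id → Spec_get_seq_id_offset a_seq_id (get_seq_id_offset a_seq_id)

-- ===== LEMMAS AND PROOFS =====

lemma pvRep9 (k : Nat) : (9 : Int) ∣ 10 ^ k - 1 := by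
  induction k with
  | zero => simp
  | succ n ih =>
    obtain ⟨c, hc⟩ := ih
    exact ⟨10 * c + 1, by rw [pow_succ]; linarith⟩

lemma pvRepSucc (k : Nat) : ((10 : Int) ^ (k + 1) - 1) / 9 = 10 ^ k + ((10 : Int) ^ k - 1) / 9 := by
  obtain ⟨c, hc⟩ := pvRep9 k
  have h1 : (10 : Int) ^ (k + 1) - 1 = 9 * (10 ^ k + c) := by rw [pow_succ]; linarith
  rw [h1, hc, Int.mul_ediv_cancel_left _ (by norm_num), Int.mul_ediv_cancel_left _ (by norm_num)]

lemma pvNumDigits_eq (m : Nat) : ∀ n : Int, (10 : Int) ^ m ≤ n → n < 10 ^ (m + 1) → pvNumDigits n = (m : Int) + 1 := by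
  induction m with
  | zero =>
    intro n h1 h2
    rw [pvNumDigits, dif_pos (by simpa using h1)]
    have h0 : PySem.Int.floordiv n 10 = 0 := by
      rw [PySem.Int.floordiv_eq_iff_of_pos (by norm_num)]
      norm_num at h1 h2 ⊢
      omega
    rw [h0, pvNumDigits]
    norm_num
  | succ m ih =>
    intro n h1 h2
    have hn : 0 < n := lt_of_lt_of_le (by positivity) h1
    rw [pvNumDigits, dif_pos hn]
    have hb1 : (10 : Int) ^ m ≤ PySem.Int.floordiv n 10 := by
      rw [PySem.Int.le_floordiv_iff_mul_le (by norm_num)]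
      calc (10 : Int) ^ m * 10 = 10 ^ (m + 1) := by rw [pow_succ]
        _ ≤ n := h1
    have hb2 : PySem.Int.floordiv n 10 < 10 ^ (m + 1) := by
      rw [PySem.Int.floordiv_lt_iff_lt_mul (by norm_num)]
      calc n < 10 ^ (m + 1 + 1) := h2
        _ = 10 ^ (m + 1) * 10 := by rw [pow_succ]
    rw [ih _ hb1 hb2]
    push_cast
    ring

lemma pvLoopA_exit (k : Nat) (a off : Int) (h1 : (10 : Int) ^ k ≤ a) (h2 : a ≤ 10 ^ (k + 1) - 1) :
    pvLoopA (a - ((10 : Int) ^ k - 1)) (9 * 10 ^ k) ((k : Int) + 1) off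
      = off + a * pvNumDigits (a - 1)
          - ((10 : Int) ^ (pvNumDigits (a - 1)).toNat - 1) / 9
          - ((k : Int) * 10 ^ k - ((10 : Int) ^ k - 1) / 9) := by
  rw [pvLoopA, dif_neg]
  · by_cases ha : (10 : Int) ^ k + 1 ≤ a
    · have hd : pvNumDigits (a - 1) = (k : Int) + 1 :=
        pvNumDigits_eq k (a - 1) (by linarith) (by linarith)
      rw [hd]
      have ht : ((k : Int) + 1).toNat = k + 1 := by omega
      rw [ht, pvRepSucc]
      ring
    · have ha' : a = 10 ^ k := le_antisymm (by linarith) h1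
      subst ha'
      cases k with
      | zero =>
        norm_num
        rw [pvNumDigits]
        norm_num
      | succ m =>
        have hd : pvNumDigits ((10 : Int) ^ (m + 1) - 1) = (m : Int) + 1 := by
          apply pvNumDigits_eq m
          · have : (1 : Int) ≤ 10 ^ m := one_le_pow₀ (by norm_num)
            rw [pow_succ]; linarith
          · have : (0 : Int) < 10 ^ (m + 1) := by positivity
            linarith
        rw [hd]
        have ht : ((m : Int) + 1).toNat = m + 1 := by omega
        rw [ht]
        push_cast
        ring
  · rintro ⟨-, hq⟩
    rw [pow_succ] at h2
    linarith

lemma pvLoopA_key (m : Nat) : ∀ (k : Nat) (a off : Int),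
    (10 : Int) ^ k ≤ a → a ≤ 10 ^ (k + m + 1) - 1 →
    pvLoopA (a - ((10 : Int) ^ k - 1)) (9 * 10 ^ k) ((k : Int) + 1) off
      = off + a * pvNumDigits (a - 1)
          - ((10 : Int) ^ (pvNumDigits (a - 1)).toNat - 1) / 9
          - ((k : Int) * 10 ^ k - ((10 : Int) ^ k - 1) / 9) := by
  induction m with
  | zero =>
    intro k a off h1 h2
    exact pvLoopA_exit k a off h1 (by simpa using h2)
  | succ m ih =>
    intro k a off h1 h2
    by_cases hc : a ≤ 10 ^ (k + 1) - 1
    · exact pvLoopA_exit k a off h1 hc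
    · push Not at hc
      have hcont : (10 : Int) ^ (k + 1) ≤ a := by linarith
      rw [pvLoopA, dif_pos ⟨by positivity, by rw [pow_succ] at hcont; linarith⟩]
      have e1 : a - ((10 : Int) ^ k - 1) - 9 * 10 ^ k = a - ((10 : Int) ^ (k + 1) - 1) := by
        rw [pow_succ]; ring
      have e2 : (9 : Int) * 10 ^ k * 10 = 9 * 10 ^ (k + 1) := by rw [pow_succ]; ring
      have e3 : ((k : Int) + 1) + 1 = ((k + 1 : Nat) : Int) + 1 := by push_cast; ring
      rw [e1, e2, e3, ih (k + 1) a _ hcont (by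
        have he : (k + 1) + m + 1 = k + (m + 1) + 1 := by omega
        rw [he]; exact h2)]
      rw [pvRepSucc]
      push_cast
      rw [pow_succ]
      ring

-- ===== VERDICT (by name: the statement is the Claim_ definition above) =====
theorem get_seq_id_offset_spec : Claim_equal_get_seq_id_offset := by
  intro a hdom
  unfold Spec_get_seq_id_offset get_seq_id_offset get_seq_id_offset_alt
  by_cases h9 : a ≤ 9
  · rw [if_pos h9, pvLoopA, dif_neg (by rintro ⟨-, h⟩; omega)]
    ring
  · rw [if_neg h9]
    push Not at h9
    simp only [Dom_get_seq_id_offset, pvDomInt, decide_eq_true_eq] at hdom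
    have key := pvLoopA_key 10 0 a 0 (by norm_num; omega) (by norm_num; omega)
    norm_num at key
    rw [key]
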